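-- pv_equiv track=rewrite | github.com/orez-/python-sundry | hr_xword/dumb.py | minimize_word_list
-- ===== SOURCE A (Python) =====
-- import collections
--
-- def solve_no_recurse(attempt, words):
--     seen = set()
--     stack = collections.deque()
--     stack.append((0, []))
--     while stack:
--         start, result = stack.pop()
--         if start == len(attempt):
--             return result
--         for word in words:
--             sum_ = start + len(word)
--             if sum_ in seen:
--                 continue
--             if attempt.startswith(word, start):
--                 seen.add(sum_)
--                 stack.append((sum_, result+[word]))
--     return None
--
-- def minimize_word_list(words):
--     word_set = set(words)
--     for word in words:
--         result = solve_no_recurse(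
--             attempt=word,
--             words=word_set - {word},
--         )
--         if result:
--             word_set.discard(word)
--     return word_set
-- ===== SOURCE B (Python) =====
-- def minimize_word_list(words):
--     # Word-break boolean DP per word (position reachability), instead of a DFS with an explicit stack.
--     kept = set(words)
--     for word in words:
--         if not word:
--             continue
--         cands = kept - {word}
--         n = len(word)
--         reach = [False] * (n + 1)
--         reach[0] = True
--         for i in range(n):
--             if reach[i]:
--                 for j in range(i + 1, n + 1):
--                     if word[i:j] in cands:
--                         reach[j] = True
--         if reach[n]:
--             kept.discard(word)
--     return kept
-- ===== Notes on version B (the rewrite author's own statement) =====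
-- stated objective: faster
-- what changed: Per word, the stack-based DFS that scans the whole candidate word list at every position is replaced by a boolean word-break DP over positions that hashes each substring into the candidate set, removing the scan over all words.
import Mathlib
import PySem

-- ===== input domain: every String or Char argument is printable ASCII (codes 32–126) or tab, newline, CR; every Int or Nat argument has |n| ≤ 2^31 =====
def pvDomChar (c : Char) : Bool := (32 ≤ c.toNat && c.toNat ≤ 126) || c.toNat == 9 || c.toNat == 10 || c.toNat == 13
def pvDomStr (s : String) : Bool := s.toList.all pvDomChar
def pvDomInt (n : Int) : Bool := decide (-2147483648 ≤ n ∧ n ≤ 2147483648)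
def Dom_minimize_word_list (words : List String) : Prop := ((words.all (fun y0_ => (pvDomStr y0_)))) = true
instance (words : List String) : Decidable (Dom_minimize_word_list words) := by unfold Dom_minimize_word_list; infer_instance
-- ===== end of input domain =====

-- B replaces A's per-word stack DFS over the candidate word list by a boolean word-break DP
-- over positions (objective: faster — the scan over all candidate words at each position is
-- replaced by substring membership tests in the candidate set).

-- ===== PORT A =====
-- attempt.startswith(word, start): exact for 0 ≤ start ≤ len(attempt), the only calls A makes
def pvStartsAt (attempt : List Char) (w : List Char) (start : Nat) : Bool :=
  (attempt.drop start).take w.length == w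

-- the body of A's `for word in words:` inner loop; st = (seen, stack), stack head = top
-- (deque.append/pop act on the right end; consing on the head mirrors that exactly)
def pvExpand (attempt : List Char) (start : Nat) (res : List String)
    (st : List Nat × List (Nat × List String)) (cands : List String) :
    List Nat × List (Nat × List String) :=
  cands.foldl (fun st w =>
    if (start + w.toList.length) ∈ st.1 then st
    else if pvStartsAt attempt w.toList start then
      ((start + w.toList.length) :: st.1, (start + w.toList.length, res ++ [w]) :: st.2)
    else st) st

-- A's `while stack:` loop; fuel (≥ stack size + unseen positions) only makes it total,
-- the proof shows attempt.length + 2 is never exhausted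
def pvSolveLoop (attempt : List Char) (cands : List String) :
    Nat → List Nat → List (Nat × List String) → Option (List String)
  | _, _, [] => none
  | 0, _, _ :: _ => none
  | fuel+1, seen, (start, res) :: rest =>
    if start = attempt.length then some res
    else
      let st := pvExpand attempt start res (seen, rest) cands
      pvSolveLoop attempt cands fuel st.1 st.2

-- solve_no_recurse(attempt, words); `words` is a Python set, iterated in insertion order
-- (the returned set of minimize_word_list is independent of that order — proved below)
def pvSolve (attempt : String) (cands : List String) : Option (List String) :=
  pvSolveLoop attempt.toList cands (attempt.toList.length + 2) [] [(0, [])]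

-- Python truthiness of `result` (None or a list)
def pvTruthy : Option (List String) → Bool
  | none => false
  | some r => !r.isEmpty

def minimize_word_list (words : List String) : List String :=
  words.foldl (fun word_set word =>
    if pvTruthy (pvSolve word (PySem.Set.diff word_set [word])) then
      PySem.Set.discard word_set word
    else word_set) (PySem.Set.ofList words)

-- ===== PORT B =====
-- inner loop `for j in range(i+1, n+1): if word[i:j] in cands: reach[j] = True`
-- (word[i:j] for 0 ≤ i ≤ j is the clamped (drop i).take (j-i), cf. PySem.List.slice_natCast)
def pvDpInner (word : List Char) (cands : List String) (i : Nat) (reach : List Bool) :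
    List Bool :=
  (List.range' (i+1) (word.length - i)).foldl (fun reach j =>
    if cands.contains (String.ofList ((word.drop i).take (j - i))) then reach.set j true
    else reach) reach

-- `reach = [False]*(n+1); reach[0] = True; for i in range(n): if reach[i]: …`
def pvDp (word : List Char) (cands : List String) : List Bool :=
  (List.range word.length).foldl (fun reach i =>
      if reach.getD i false then pvDpInner word cands i reach else reach)
    ((List.replicate (word.length + 1) false).set 0 true)

def minimize_word_list_alt (words : List String) : List String :=
  words.foldl (fun kept word =>
    if word.toList.isEmpty then kept
    else if (pvDp word.toList (PySem.Set.diff kept [word])).getD word.toList.length false then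
      PySem.Set.discard kept word
    else kept) (PySem.Set.ofList words)

-- ===== PRECONDITION & SPEC =====
def Spec_minimize_word_list (words : List String) (out : List String) : Prop := out = minimize_word_list_alt words
instance (words : List String) (out : List String) : Decidable (Spec_minimize_word_list words out) := by unfold Spec_minimize_word_list; infer_instance

-- ===== CLAIM (what is proved, stated in full; the proofs are below) =====
def Claim_equal_minimize_word_list : Prop := ∀ (words : List String), Dom_minimize_word_list words → Spec_minimize_word_list words (minimize_word_list words)

-- ===== LEMMAS AND PROOFS =====

-- an edge of the word-break graph: one word of cands matches attempt at position p
def pvEdge (attempt : List Char) (cands : List String) (p q : Nat) : Prop :=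
  ∃ w ∈ cands, pvStartsAt attempt w.toList p = true ∧ q = p + w.toList.length

-- positions of attempt reachable from 0 by concatenating words of cands
inductive pvReach (attempt : List Char) (cands : List String) : Nat → Prop
  | zero : pvReach attempt cands 0
  | step {p q : Nat} : pvReach attempt cands p → pvEdge attempt cands p q →
      pvReach attempt cands q

theorem pvStartsAt_iff (a w : List Char) (p : Nat) :
    pvStartsAt a w p = true ↔ (a.drop p).take w.length = w := by
  simp [pvStartsAt]

theorem pvStartsAt_le (a w : List Char) (p : Nat) (h : pvStartsAt a w p = true)
    (hp : p ≤ a.length) : p + w.length ≤ a.length := by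
  rw [pvStartsAt_iff] at h
  have hl := congrArg List.length h
  simp [List.length_take, List.length_drop] at hl
  omega

theorem pvEdge_iff_sub (a : List Char) (c : List String) (p q : Nat)
    (h1 : p < q) (h2 : q ≤ a.length) :
    pvEdge a c p q ↔ String.ofList ((a.drop p).take (q - p)) ∈ c := by
  constructor
  · rintro ⟨w, hw, hsa, hq⟩
    rw [pvStartsAt_iff] at hsa
    have hlen : w.toList.length = q - p := by omega
    rw [hlen] at hsa
    rw [hsa, String.ofList_toList]
    exact hw
  · intro hmem
    have htl : (String.ofList ((a.drop p).take (q - p))).toList = (a.drop p).take (q - p) :=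
      String.toList_ofList
    have hlen : ((a.drop p).take (q - p)).length = q - p := by
      simp [List.length_take, List.length_drop]; omega
    refine ⟨_, hmem, ?_, ?_⟩
    · rw [pvStartsAt_iff, htl, hlen]
    · rw [htl, hlen]; omega

theorem pvReach_strip (a : List Char) (c : List String) (q : Nat)
    (h : pvReach a c q) : q = 0 ∨ ∃ p, pvReach a c p ∧ pvEdge a c p q ∧ p < q := by
  induction h with
  | zero => exact Or.inl rfl
  | @step p q hp e ih =>
    obtain ⟨w, hw, hsa, hq⟩ := e
    rcases Nat.eq_zero_or_pos w.toList.length with h0 | h0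
    · have : q = p := by omega
      subst this; exact ih
    · exact Or.inr ⟨p, hp, ⟨w, hw, hsa, hq⟩, by omega⟩

theorem pvReach_iff_strip (a : List Char) (c : List String) (q : Nat) :
    pvReach a c q ↔ (q = 0 ∨ ∃ p, pvReach a c p ∧ pvEdge a c p q ∧ p < q) := by
  constructor
  · exact pvReach_strip a c q
  · rintro (rfl | ⟨p, hp, e, _⟩)
    · exact pvReach.zero
    · exact pvReach.step hp e

-- ---- A side ----

theorem pvExpand_cons (a : List Char) (start : Nat) (res : List String)
    (seen : List Nat) (rest : List (Nat × List String)) (w : String) (cs : List String) :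
    pvExpand a start res (seen, rest) (w :: cs) =
      if (start + w.toList.length) ∈ seen then pvExpand a start res (seen, rest) cs
      else if pvStartsAt a w.toList start then
        pvExpand a start res
          ((start + w.toList.length) :: seen,
           (start + w.toList.length, res ++ [w]) :: rest) cs
      else pvExpand a start res (seen, rest) cs := by
  simp only [pvExpand, List.foldl_cons]
  split_ifs with h1 h2 <;> simp_all

theorem pvExpand_mem (a : List Char) (start : Nat) (res : List String) :
    ∀ (cands : List String) (st : List Nat × List (Nat × List String))
      (pr : Nat × List String), pr ∈ (pvExpand a start res st cands).2 →
      pr ∈ st.2 ∨ ∃ w ∈ cands, pvStartsAt a w.toList start = true ∧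
        pr = (start + w.toList.length, res ++ [w]) := by
  intro cands
  induction cands with
  | nil => intro st pr h; exact Or.inl h
  | cons w cs ih =>
    rintro ⟨seen, rest⟩ pr h
    rw [pvExpand_cons] at h
    split_ifs at h with h1 h2
    · rcases ih (seen, rest) pr h with hin | ⟨w', hw', hsa', heq⟩
      · exact Or.inl hin
      · exact Or.inr ⟨w', List.mem_cons_of_mem _ hw', hsa', heq⟩
    · rcases ih _ pr h with hin | ⟨w', hw', hsa', heq⟩
      · rcases List.mem_cons.mp hin with heq | hin2
        · exact Or.inr ⟨w, List.mem_cons_self, h2, heq⟩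
        · exact Or.inl hin2
      · exact Or.inr ⟨w', List.mem_cons_of_mem _ hw', hsa', heq⟩
    · rcases ih (seen, rest) pr h with hin | ⟨w', hw', hsa', heq⟩
      · exact Or.inl hin
      · exact Or.inr ⟨w', List.mem_cons_of_mem _ hw', hsa', heq⟩

theorem pvSound (a : List Char) (c : List String) :
    ∀ (fuel : Nat) (seen : List Nat) (stack : List (Nat × List String)) (r : List String),
      pvSolveLoop a c fuel seen stack = some r →
      (∀ pr ∈ stack, pvReach a c pr.1 ∧ (pr.2 = [] → pr.1 = 0)) →
      pvReach a c a.length ∧ (r = [] → a.length = 0) := by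
  intro fuel
  induction fuel with
  | zero => intro seen stack r h _; cases stack with
    | nil => simp [pvSolveLoop] at h
    | cons pr rest => simp [pvSolveLoop] at h
  | succ fuel ih =>
    intro seen stack r h hstack
    cases stack with
    | nil => simp [pvSolveLoop] at h
    | cons top rest =>
      obtain ⟨start, res⟩ := top
      rw [pvSolveLoop] at h
      split_ifs at h with hend
      · obtain ⟨hr, him⟩ := hstack (start, res) List.mem_cons_self
        injection h with h
        subst h
        rw [hend] at hr him
        exact ⟨hr, fun h0 => him h0⟩
      · refine ih _ _ _ h ?_
        intro pr hpr
        rcases pvExpand_mem a start res c (seen, rest) pr hpr with hin | ⟨w, hw, hsa, heq⟩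
        · exact hstack pr (List.mem_cons_of_mem _ hin)
        · subst heq
          refine ⟨pvReach.step (hstack (start, res) List.mem_cons_self).1
            ⟨w, hw, hsa, rfl⟩, ?_⟩
          simp

theorem pvExpand_spec (a : List Char) (start : Nat) (res : List String)
    (hst : start ≤ a.length) :
    ∀ (cands : List String) (seen : List Nat) (rest : List (Nat × List String)),
      (∀ s ∈ seen, s ≤ a.length) → seen.Nodup →
      ∃ pushed : List (Nat × List String),
        (pvExpand a start res (seen, rest) cands).1 = pushed.map Prod.fst ++ seen ∧
        (pvExpand a start res (seen, rest) cands).2 = pushed ++ rest ∧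
        (pvExpand a start res (seen, rest) cands).1.Nodup ∧
        (∀ s ∈ (pvExpand a start res (seen, rest) cands).1, s ≤ a.length) ∧
        (∀ w ∈ cands, pvStartsAt a w.toList start = true →
          start + w.toList.length ∈ (pvExpand a start res (seen, rest) cands).1) := by
  intro cands
  induction cands with
  | nil =>
    intro seen rest hb hn
    exact ⟨[], by simp [pvExpand], by simp [pvExpand], hn, hb, by simp⟩
  | cons w cs ih =>
    intro seen rest hb hn
    rw [pvExpand_cons]
    by_cases hmem : (start + w.toList.length) ∈ seen
    · rw [if_pos hmem]
      obtain ⟨pushed, e1, e2, e3, e4, e5⟩ := ih seen rest hb hn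
      refine ⟨pushed, e1, e2, e3, e4, ?_⟩
      intro w' hw' hsa'
      rcases List.mem_cons.mp hw' with rfl | hw2
      · rw [e1]; exact List.mem_append.mpr (Or.inr hmem)
      · exact e5 w' hw2 hsa'
    · rw [if_neg hmem]
      by_cases hsa : pvStartsAt a w.toList start = true
      · rw [if_pos hsa]
        have hle : start + w.toList.length ≤ a.length := by
          have := pvStartsAt_le a w.toList start hsa hst
          simpa using this
        obtain ⟨pushed, e1, e2, e3, e4, e5⟩ :=
          ih ((start + w.toList.length) :: seen)
            ((start + w.toList.length, res ++ [w]) :: rest)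
            (by intro s hs; rcases List.mem_cons.mp hs with rfl | hs2
                · exact hle
                · exact hb s hs2)
            (List.nodup_cons.mpr ⟨hmem, hn⟩)
        refine ⟨pushed ++ [(start + w.toList.length, res ++ [w])], ?_, ?_, e3, e4, ?_⟩
        · rw [e1]; simp
        · rw [e2]; simp
        · intro w' hw' hsa'
          rcases List.mem_cons.mp hw' with rfl | hw2
          · rw [e1]
            exact List.mem_append.mpr (Or.inr List.mem_cons_self)
          · exact e5 w' hw2 hsa'
      · rw [if_neg hsa]
        obtain ⟨pushed, e1, e2, e3, e4, e5⟩ := ih seen rest hb hn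
        refine ⟨pushed, e1, e2, e3, e4, ?_⟩
        intro w' hw' hsa'
        rcases List.mem_cons.mp hw' with rfl | hw2
        · exact absurd hsa' hsa
        · exact e5 w' hw2 hsa' 

theorem pvComplete (a : List Char) (c : List String) :
    ∀ (fuel : Nat) (seen : List Nat) (stack : List (Nat × List String)),
      (∀ s ∈ seen, s ≤ a.length) → seen.Nodup →
      stack.length + (a.length + 1 - seen.length) ≤ fuel →
      (∀ p, (p = 0 ∨ p ∈ seen) →
        p ∈ stack.map Prod.fst ∨ ∀ q, pvEdge a c p q → q ∈ seen) →
      (a.length ∈ seen → a.length ∈ stack.map Prod.fst) →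
      (∀ pr ∈ stack, pr.1 = 0 ∨ pr.1 ∈ seen) →
      pvSolveLoop a c fuel seen stack = none →
      a.length = 0 ∨ ¬ pvReach a c a.length := by
  intro fuel
  induction fuel with
  | zero =>
    intro seen stack hb hn h3 h4 h5 h6 _
    have hstack : stack = [] := by
      have : stack.length = 0 := by omega
      exact List.length_eq_zero_iff.mp this
    subst hstack
    rcases Nat.eq_zero_or_pos a.length with h0 | h0
    · exact Or.inl h0
    · refine Or.inr ?_
      intro hr
      have haux : ∀ p, pvReach a c p → p = 0 ∨ p ∈ seen := by
        intro p hp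
        induction hp with
        | zero => exact Or.inl rfl
        | @step p q hp e ihp =>
          rcases h4 p ihp with hin | hcl
          · simp at hin
          · exact Or.inr (hcl q e)
      rcases haux a.length hr with h | h
      · omega
      · simpa using h5 h
  | succ fuel ih =>
    intro seen stack hb hn h3 h4 h5 h6 h
    cases stack with
    | nil =>
      rcases Nat.eq_zero_or_pos a.length with h0 | h0
      · exact Or.inl h0
      · refine Or.inr ?_
        intro hr
        have haux : ∀ p, pvReach a c p → p = 0 ∨ p ∈ seen := by
          intro p hp
          induction hp with
          | zero => exact Or.inl rfl
          | @step p q hp e ihp =>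
            rcases h4 p ihp with hin | hcl
            · simp at hin
            · exact Or.inr (hcl q e)
        rcases haux a.length hr with hcase | hcase
        · omega
        · simpa using h5 hcase
    | cons top rest =>
      obtain ⟨start, res⟩ := top
      rw [pvSolveLoop] at h
      by_cases hend : start = a.length
      · rw [if_pos hend] at h; exact absurd h (by simp)
      · rw [if_neg hend] at h
        have hstle : start ≤ a.length := by
          rcases h6 (start, res) List.mem_cons_self with h0 | hs
          · simp at h0; omega
          · exact hb start hs
        obtain ⟨pushed, e1, e2, e3, e4, e5⟩ :=
          pvExpand_spec a start res hstle c seen rest hb hn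
        set st := pvExpand a start res (seen, rest) c with hstdef
        have hsub : st.1.length ≤ a.length + 1 := by
          have hss : st.1 ⊆ List.range (a.length + 1) := by
            intro x hx
            exact List.mem_range.mpr (by have := e4 x hx; omega)
          have := (List.subperm_of_subset e3 hss).length_le
          simpa using this
        refine ih st.1 st.2 e4 e3 ?_ ?_ ?_ ?_ h
        · have hl1 : st.1.length = pushed.length + seen.length := by rw [e1]; simp
          have hl2 : st.2.length = pushed.length + rest.length := by rw [e2]; simp
          simp only [List.length_cons] at h3
          omega
        · intro p hp
          by_cases hpush : p ∈ pushed.map Prod.fst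
          · refine Or.inl ?_
            rw [e2, List.map_append]
            exact List.mem_append.mpr (Or.inl hpush)
          · have hp' : p = 0 ∨ p ∈ seen := by
              rcases hp with rfl | hps
              · exact Or.inl rfl
              · rw [e1] at hps
                rcases List.mem_append.mp hps with hcase | hcase
                · exact absurd hcase hpush
                · exact Or.inr hcase
            rcases h4 p hp' with hin | hcl
            · simp only [List.map_cons] at hin
              rcases List.mem_cons.mp hin with rfl | hin2
              · refine Or.inr ?_
                intro q hq
                obtain ⟨w, hw, hsa, hq'⟩ := hq
                subst hq'
                exact e5 w hw hsa
              · refine Or.inl ?_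
                rw [e2, List.map_append]
                exact List.mem_append.mpr (Or.inr hin2)
            · refine Or.inr ?_
              intro q hq
              rw [e1]
              exact List.mem_append.mpr (Or.inr (hcl q hq))
        · intro hlen
          rw [e1] at hlen
          rcases List.mem_append.mp hlen with hcase | hcase
          · rw [e2, List.map_append]
            exact List.mem_append.mpr (Or.inl hcase)
          · have := h5 hcase
            simp only [List.map_cons] at this
            rcases List.mem_cons.mp this with heq | hin2
            · exact absurd heq.symm hend
            · rw [e2, List.map_append]
              exact List.mem_append.mpr (Or.inr hin2)
        · intro pr hpr
          rw [e2] at hpr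
          rcases List.mem_append.mp hpr with hcase | hcase
          · refine Or.inr ?_
            rw [e1]
            exact List.mem_append.mpr (Or.inl (List.mem_map.mpr ⟨pr, hcase, rfl⟩))
          · rcases h6 pr (List.mem_cons_of_mem _ hcase) with h0 | hs
            · exact Or.inl h0
            · refine Or.inr ?_
              rw [e1]
              exact List.mem_append.mpr (Or.inr hs)

theorem pvSolveLoop_len_zero (a : List Char) (c : List String) (h0 : a.length = 0) :
    pvSolveLoop a c (a.length + 2) [] [(0, [])] = some [] := by
  rw [show a.length + 2 = 0 + 1 + 1 from by omega, pvSolveLoop]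
  rw [if_pos h0.symm]

theorem pvSolve_truthy (word : String) (c : List String) :
    pvTruthy (pvSolve word c) = true ↔
      (0 < word.toList.length ∧ pvReach word.toList c word.toList.length) := by
  have hinv0 : ∀ pr ∈ [((0 : Nat), ([] : List String))],
      pvReach word.toList c pr.1 ∧ (pr.2 = [] → pr.1 = 0) := by
    intro pr hpr
    simp only [List.mem_singleton] at hpr
    subst hpr
    exact ⟨pvReach.zero, fun _ => rfl⟩
  unfold pvSolve
  constructor
  · intro ht
    cases h : pvSolveLoop word.toList c (word.toList.length + 2) [] [(0, [])] with
    | none => rw [h] at ht; simp [pvTruthy] at ht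
    | some r =>
      rw [h] at ht
      have hne : r ≠ [] := by simpa [pvTruthy] using ht
      obtain ⟨hr, _⟩ := pvSound word.toList c _ _ _ _ h hinv0
      refine ⟨?_, hr⟩
      rcases Nat.eq_zero_or_pos word.toList.length with h0 | h0
      · rw [pvSolveLoop_len_zero word.toList c h0] at h
        injection h with h
        exact absurd h.symm hne
      · exact h0
  · rintro ⟨hpos, hr⟩
    cases h : pvSolveLoop word.toList c (word.toList.length + 2) [] [(0, [])] with
    | some r =>
      obtain ⟨_, him⟩ := pvSound word.toList c _ _ _ _ h hinv0
      have hne : r ≠ [] := fun h0 => absurd (him h0) (by omega)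
      simp [pvTruthy, hne]
    | none =>
      rcases pvComplete word.toList c _ _ _ (by simp) List.nodup_nil
        (by simp; omega)
        (by intro p hp
            simp only [List.not_mem_nil, or_false] at hp
            subst hp
            simp)
        (by simp) (by simp) h with h0 | hnr
      · omega
      · exact absurd hr hnr

-- ---- B side ----

theorem pvFoldSet_length (cnd : Nat → Bool) :
    ∀ (js : List Nat) (r : List Bool),
      (js.foldl (fun r i => if cnd i then r.set i true else r) r).length = r.length := by
  intro js
  induction js with
  | nil => intro r; rfl
  | cons i js ih =>
    intro r
    rw [List.foldl_cons, ih]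
    split <;> simp

theorem pvFoldSet_getD (cnd : Nat → Bool) :
    ∀ (js : List Nat) (r : List Bool) (j : Nat), (∀ i ∈ js, i < r.length) →
      ((js.foldl (fun r i => if cnd i then r.set i true else r) r).getD j false = true ↔
        (r.getD j false = true ∨ (j ∈ js ∧ cnd j = true))) := by
  intro js
  induction js with
  | nil => intro r j _; simp
  | cons i js ih =>
    intro r j hlt
    have hi : i < r.length := hlt i List.mem_cons_self
    rw [List.foldl_cons]
    have hlen : (if cnd i then r.set i true else r).length = r.length := by
      split <;> simp
    rw [ih (if cnd i then r.set i true else r) j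
      (by intro i' hi'; rw [hlen]; exact hlt i' (List.mem_cons_of_mem _ hi'))]
    have hstep : ((if cnd i then r.set i true else r).getD j false = true) ↔
        (r.getD j false = true ∨ (j = i ∧ cnd i = true)) := by
      by_cases hc : cnd i = true
      · rw [if_pos hc]
        by_cases hji : j = i
        · subst hji
          simp [List.getD_eq_getElem?_getD, hi, hc]
        · simp [List.getD_eq_getElem?_getD, List.getElem?_set_ne (fun h => hji h.symm), hji]
      · rw [if_neg hc]
        simp [hc]
    rw [hstep]
    constructor
    · rintro ((hrj | ⟨rfl, hcj⟩) | ⟨hjm, hcj⟩)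
      · exact Or.inl hrj
      · exact Or.inr ⟨List.mem_cons_self, hcj⟩
      · exact Or.inr ⟨List.mem_cons_of_mem _ hjm, hcj⟩
    · rintro (hrj | ⟨hjm, hcj⟩)
      · exact Or.inl (Or.inl hrj)
      · rcases List.mem_cons.mp hjm with rfl | hjm2
        · exact Or.inl (Or.inr ⟨rfl, hcj⟩)
        · exact Or.inr ⟨hjm2, hcj⟩

theorem pvDpInner_length (a : List Char) (c : List String) (k : Nat) (r : List Bool) :
    (pvDpInner a c k r).length = r.length := by
  rw [pvDpInner]
  exact pvFoldSet_length _ _ r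

theorem pvDpInner_getD (a : List Char) (c : List String) (k : Nat) (r : List Bool)
    (hr : r.length = a.length + 1) (j : Nat) :
    ((pvDpInner a c k r).getD j false = true ↔
      (r.getD j false = true ∨ (k < j ∧ j ≤ a.length ∧ pvEdge a c k j))) := by
  rw [pvDpInner]
  rw [pvFoldSet_getD _ _ r j
    (by intro i hi
        rw [List.mem_range'_1] at hi
        omega)]
  have hmem : j ∈ List.range' (k + 1) (a.length - k) ↔ (k < j ∧ j ≤ a.length) := by
    rw [List.mem_range'_1]; omega
  rw [hmem]
  constructor
  · rintro (hrj | ⟨⟨hkj, hjl⟩, hc⟩)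
    · exact Or.inl hrj
    · refine Or.inr ⟨hkj, hjl, ?_⟩
      rw [pvEdge_iff_sub a c k j hkj hjl]
      simpa using hc
  · rintro (hrj | ⟨hkj, hjl, he⟩)
    · exact Or.inl hrj
    · refine Or.inr ⟨⟨hkj, hjl⟩, ?_⟩
      rw [pvEdge_iff_sub a c k j hkj hjl] at he
      simpa using he

theorem pvDp_loop (a : List Char) (c : List String) :
    ∀ K, K ≤ a.length →
      ((List.range K).foldl (fun reach i =>
          if reach.getD i false then pvDpInner a c i reach else reach)
        ((List.replicate (a.length + 1) false).set 0 true)).length = a.length + 1 ∧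
      ∀ j, j ≤ a.length →
        (((List.range K).foldl (fun reach i =>
            if reach.getD i false then pvDpInner a c i reach else reach)
          ((List.replicate (a.length + 1) false).set 0 true)).getD j false = true ↔
          (j = 0 ∨ ∃ i, i < K ∧ pvReach a c i ∧ pvEdge a c i j ∧ i < j)) := by
  have hinit : ∀ j, ((List.replicate (a.length + 1) false).set 0 true).getD j false =
      decide (j = 0) := by
    intro j
    by_cases hj0 : j = 0
    · subst hj0
      simp [List.getD_eq_getElem?_getD]
    · simp only [List.getD_eq_getElem?_getD, List.getElem?_set_ne (fun h => hj0 h.symm),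
        List.getElem?_replicate, hj0, decide_false]
      split <;> rfl
  intro K
  induction K with
  | zero =>
    intro _
    refine ⟨by simp, ?_⟩
    intro j _
    simp only [List.range_zero, List.foldl_nil, hinit j]
    simp
  | succ K ihK =>
    intro hK1
    have hK : K ≤ a.length := by omega
    obtain ⟨hlen, hget⟩ := ihK hK
    rw [List.range_succ, List.foldl_append, List.foldl_cons, List.foldl_nil]
    set F := (List.range K).foldl (fun reach i =>
        if reach.getD i false then pvDpInner a c i reach else reach)
      ((List.replicate (a.length + 1) false).set 0 true) with hFdef
    have hreach : F.getD K false = true ↔ pvReach a c K := by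
      rw [hget K hK, pvReach_iff_strip a c K]
      constructor
      · rintro (h0 | ⟨i, _, hri, hei, hij⟩)
        · exact Or.inl h0
        · exact Or.inr ⟨i, hri, hei, hij⟩
      · rintro (h0 | ⟨p, hp, he, hpK⟩)
        · exact Or.inl h0
        · exact Or.inr ⟨p, hpK, hp, he, hpK⟩
    by_cases hb : F.getD K false = true
    · rw [if_pos hb]
      have hRK := hreach.mp hb
      refine ⟨by rw [pvDpInner_length]; exact hlen, ?_⟩
      intro j hj
      rw [pvDpInner_getD a c K F hlen j, hget j hj]
      constructor
      · rintro ((h0 | ⟨i, hi, hri, hei, hij⟩) | ⟨hKj, hjl, he⟩)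
        · exact Or.inl h0
        · exact Or.inr ⟨i, by omega, hri, hei, hij⟩
        · exact Or.inr ⟨K, by omega, hRK, he, hKj⟩
      · rintro (h0 | ⟨i, hi, hri, hei, hij⟩)
        · exact Or.inl (Or.inl h0)
        · rcases Nat.lt_succ_iff_lt_or_eq.mp hi with hiK | rfl
          · exact Or.inl (Or.inr ⟨i, hiK, hri, hei, hij⟩)
          · exact Or.inr ⟨hij, hj, hei⟩
    · rw [if_neg hb]
      have hnR : ¬ pvReach a c K := fun h => hb (hreach.mpr h)
      refine ⟨hlen, ?_⟩
      intro j hj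
      rw [hget j hj]
      constructor
      · rintro (h0 | ⟨i, hi, h⟩)
        · exact Or.inl h0
        · exact Or.inr ⟨i, by omega, h⟩
      · rintro (h0 | ⟨i, hi, hri, hei, hij⟩)
        · exact Or.inl h0
        · rcases Nat.lt_succ_iff_lt_or_eq.mp hi with hiK | rfl
          · exact Or.inr ⟨i, hiK, hri, hei, hij⟩
          · exact absurd hri hnR

theorem pvDp_final (a : List Char) (c : List String) :
    ((pvDp a c).getD a.length false = true ↔ pvReach a c a.length) := by
  rw [pvDp, (pvDp_loop a c a.length le_rfl).2 a.length le_rfl,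
    pvReach_iff_strip a c a.length]
  constructor
  · rintro (h0 | ⟨i, _, hri, hei, hij⟩)
    · exact Or.inl h0
    · exact Or.inr ⟨i, hri, hei, hij⟩
  · rintro (h0 | ⟨p, hp, he, hpK⟩)
    · exact Or.inl h0
    · exact Or.inr ⟨p, hpK, hp, he, hpK⟩

-- ---- combination ----

theorem pvStep_eq (word : String) (c : List String) :
    pvTruthy (pvSolve word c) =
      (if word.toList.isEmpty then false
       else (pvDp word.toList c).getD word.toList.length false) := by
  by_cases he : word.toList.isEmpty = true
  · rw [if_pos he]
    have h0 : word.toList.length = 0 := by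
      rw [List.isEmpty_iff] at he
      simp [he]
    unfold pvSolve
    rw [pvSolveLoop_len_zero word.toList c h0]
    rfl
  · rw [if_neg he]
    have hpos : 0 < word.toList.length := by
      have : word.toList ≠ [] := by simpa [List.isEmpty_iff] using he
      exact List.length_pos_iff.mpr this
    rw [Bool.eq_iff_iff, pvSolve_truthy, pvDp_final]
    exact ⟨fun h => h.2, fun h => ⟨hpos, h⟩⟩

theorem pvFold_eq : ∀ (ws : List String) (s : List String),
    ws.foldl (fun word_set word =>
      if pvTruthy (pvSolve word (PySem.Set.diff word_set [word])) then
        PySem.Set.discard word_set word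
      else word_set) s =
    ws.foldl (fun kept word =>
      if word.toList.isEmpty then kept
      else if (pvDp word.toList (PySem.Set.diff kept [word])).getD word.toList.length false then
        PySem.Set.discard kept word
      else kept) s := by
  intro ws
  induction ws with
  | nil => intro s; rfl
  | cons w ws ih =>
    intro s
    have hstep : (if pvTruthy (pvSolve w (PySem.Set.diff s [w])) then
        PySem.Set.discard s w else s) =
        (if w.toList.isEmpty then s
         else if (pvDp w.toList (PySem.Set.diff s [w])).getD w.toList.length false then
           PySem.Set.discard s w
         else s) := by
      rw [pvStep_eq w (PySem.Set.diff s [w])]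
      by_cases he : w.toList.isEmpty = true
      · simp [he]
      · simp [he]
    rw [List.foldl_cons, List.foldl_cons, hstep]
    exact ih _

-- ===== VERDICT (by name: the statement is the Claim_ definition above) =====
theorem minimize_word_list_spec : Claim_equal_minimize_word_list := by
  intro words _
  unfold Spec_minimize_word_list minimize_word_list minimize_word_list_alt
  exact pvFold_eq words (PySem.Set.ofList words)
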